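-- pv_equiv track=rewrite | github.com/LeeJeongWook/LGIT_SW_Programming | 09. 택배 수거.py | route_cost
-- ===== SOURCE A (Python) =====
-- def get_cost(p1, p2, box_cnt):
-- 	return (abs(p1[0] - p2[0]) + abs(p1[1] - p2[1])) * (1 + box_cnt)
--
-- def route_cost(base, route):
-- 	cost = 0
-- 	box_cnt = 0
-- 	cur_pos = base
--
-- 	for p in route:
-- 		cost += get_cost(cur_pos, p, box_cnt)
-- 		box_cnt += 1
-- 		cur_pos = p
--
-- 	cost += get_cost(cur_pos, base, box_cnt)
-- 	return cost
-- ===== SOURCE B (Python) =====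
-- def route_cost(base, route):
--     # Back-to-front suffix-sum formulation: a leg's distance stays in the
--     # running suffix once per earlier leg, so each leg i is counted (1+i)
--     # times -- no box counter and no multiplication by a weight.
--     path = [base] + list(route) + [base]
--     suffix = total = 0
--     for a, b in reversed(list(zip(path, path[1:]))):
--         suffix += abs(a[0] - b[0]) + abs(a[1] - b[1])
--         total += suffix
--     return total
-- ===== Notes on version B (the rewrite author's own statement) =====
-- stated objective: alternative
-- what changed: B replaces the index-weighted forward loop (cost += dist * (1 + box_cnt)) by a back-to-front pass over the legs that keeps a running suffix-distance and adds it once per leg, so the (1+i) weight emerges from repeated suffix accumulation and no counter or multiplication is used.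
import Mathlib
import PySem

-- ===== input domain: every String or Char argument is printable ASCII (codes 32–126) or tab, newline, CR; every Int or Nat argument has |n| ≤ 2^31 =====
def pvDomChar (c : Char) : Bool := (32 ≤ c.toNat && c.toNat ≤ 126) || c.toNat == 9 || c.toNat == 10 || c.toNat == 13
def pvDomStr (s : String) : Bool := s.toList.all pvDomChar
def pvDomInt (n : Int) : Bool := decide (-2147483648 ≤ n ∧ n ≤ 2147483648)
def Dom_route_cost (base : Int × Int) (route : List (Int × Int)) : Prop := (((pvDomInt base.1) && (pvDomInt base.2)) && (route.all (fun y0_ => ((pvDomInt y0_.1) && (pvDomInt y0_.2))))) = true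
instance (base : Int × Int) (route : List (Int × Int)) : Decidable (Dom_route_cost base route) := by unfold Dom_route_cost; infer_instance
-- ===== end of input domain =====

-- B replaces the index-weighted forward loop by a back-to-front suffix-sum pass (alternative formulation, same O(n) cost).

-- ===== PORT A =====
def get_cost (p1 p2 : Int × Int) (box_cnt : Int) : Int :=
  ((p1.1 - p2.1).natAbs + (p1.2 - p2.2).natAbs : Int) * (1 + box_cnt)

def route_cost (base : Int × Int) (route : List (Int × Int)) : Int :=
  -- state (cost, box_cnt, cur_pos), exactly A's loop variables
  let s := route.foldl (fun (st : Int × Int × (Int × Int)) p =>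
      (st.1 + get_cost st.2.2 p st.2.1, st.2.1 + 1, p)) ((0 : Int), (0 : Int), base)
  s.1 + get_cost s.2.2 base s.2.1

-- ===== PORT B =====
def route_cost_alt (base : Int × Int) (route : List (Int × Int)) : Int :=
  let path := base :: (route ++ [base])
  -- loop over the legs reversed, state (suffix, total)
  let st := (path.zip path.tail).reverse.foldl
    (fun (st : Int × Int) ab =>
      let s := st.1 + ((ab.1.1 - ab.2.1).natAbs + (ab.1.2 - ab.2.2).natAbs : Int)
      (s, st.2 + s)) ((0 : Int), (0 : Int))
  st.2

-- ===== PRECONDITION & SPEC =====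
def Spec_route_cost (base : Int × Int) (route : List (Int × Int)) (out : Int) : Prop := out = route_cost_alt base route
instance (base : Int × Int) (route : List (Int × Int)) (out : Int) : Decidable (Spec_route_cost base route out) := by unfold Spec_route_cost; infer_instance

-- ===== CLAIM (what is proved, stated in full; the proofs are below) =====
def Claim_equal_route_cost : Prop := ∀ (base : Int × Int) (route : List (Int × Int)), Dom_route_cost base route → Spec_route_cost base route (route_cost base route)

-- ===== LEMMAS AND PROOFS =====

-- leg distance
def legD (ab : (Int × Int) × (Int × Int)) : Int :=
  ((ab.1.1 - ab.2.1).natAbs + (ab.1.2 - ab.2.2).natAbs : Int)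

-- total distance of a leg list, and the index-weighted tour cost
def sumD : List ((Int × Int) × (Int × Int)) → Int
  | [] => 0
  | x :: xs => legD x + sumD xs

def wcost : List ((Int × Int) × (Int × Int)) → Int
  | [] => 0
  | x :: xs => legD x + sumD xs + wcost xs

-- reference recursion: cost of the remaining tour from cur carrying k boxes
def tourCost (cur : Int × Int) (route : List (Int × Int)) (base : Int × Int) (k : Int) : Int :=
  match route with
  | [] => get_cost cur base k
  | p :: rest => get_cost cur p k + tourCost p rest base (k + 1)

theorem routeA_eq_tour (route : List (Int × Int)) :
    ∀ (cur base : Int × Int) (k c : Int),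
    (let s := route.foldl (fun (st : Int × Int × (Int × Int)) p =>
        (st.1 + get_cost st.2.2 p st.2.1, st.2.1 + 1, p)) (c, k, cur)
     s.1 + get_cost s.2.2 base s.2.1) = c + tourCost cur route base k := by
  induction route with
  | nil => intro cur base k c; simp [tourCost]
  | cons p rest ih =>
      intro cur base k c
      simp only [List.foldl_cons]
      rw [ih p base (k + 1) (c + get_cost cur p k)]
      simp [tourCost]; ring

-- the legs of the tour from cur through route back to base
def legsOf (cur : Int × Int) (route : List (Int × Int)) (base : Int × Int) :
    List ((Int × Int) × (Int × Int)) :=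
  let path := cur :: (route ++ [base])
  path.zip path.tail

theorem legsOf_cons (cur p : Int × Int) (rest : List (Int × Int)) (base : Int × Int) :
    legsOf cur (p :: rest) base = (cur, p) :: legsOf p rest base := by
  simp [legsOf]

theorem tour_eq_wcost (route : List (Int × Int)) :
    ∀ (cur base : Int × Int) (k : Int),
    tourCost cur route base k = wcost (legsOf cur route base) + k * sumD (legsOf cur route base) := by
  induction route with
  | nil =>
      intro cur base k
      simp [tourCost, legsOf, wcost, sumD, legD, get_cost]; ring
  | cons p rest ih =>
      intro cur base k
      rw [legsOf_cons]
      simp only [tourCost, wcost, sumD]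
      rw [ih p base (k + 1)]
      simp [get_cost, legD]; ring

-- B's reversed foldl computes (sumD, wcost)
theorem Bfold (legs : List ((Int × Int) × (Int × Int))) :
    legs.reverse.foldl
      (fun (st : Int × Int) ab =>
        let s := st.1 + ((ab.1.1 - ab.2.1).natAbs + (ab.1.2 - ab.2.2).natAbs : Int)
        (s, st.2 + s)) ((0 : Int), (0 : Int))
    = (sumD legs, wcost legs) := by
  rw [List.foldl_reverse]
  induction legs with
  | nil => simp [sumD, wcost]
  | cons x xs ih =>
      simp only [List.foldr_cons, ih]
      simp [sumD, wcost, legD]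
      constructor <;> ring

-- ===== VERDICT (by name: the statement is the Claim_ definition above) =====
theorem route_cost_spec : Claim_equal_route_cost := by
  intro base route _
  show route_cost base route = route_cost_alt base route
  unfold route_cost route_cost_alt
  rw [routeA_eq_tour route base base 0 0]
  have h := Bfold (legsOf base route base)
  simp only [legsOf] at h
  show _ = (List.foldl
      (fun (st : Int × Int) ab =>
        (st.1 + ((ab.1.1 - ab.2.1).natAbs + (ab.1.2 - ab.2.2).natAbs : Int),
          st.2 + (st.1 + ((ab.1.1 - ab.2.1).natAbs + (ab.1.2 - ab.2.2).natAbs : Int))))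
      ((0 : Int), (0 : Int))
      (((base :: (route ++ [base])).zip (base :: (route ++ [base])).tail).reverse)).2
  rw [h]
  rw [tour_eq_wcost route base base 0]
  simp [legsOf]
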